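-- pv_equiv track=rewrite | github.com/soy-russ-bp/proyectoTLP | src/lenguajeTaan/Analex.py | convertir_numero
-- ===== SOURCE A (Python) =====
-- def convertir_numero(s):
--     # Convierte el string del número especial a un número decimal
--     partes = s.split(',')
--     valor_total = 0
--     for i, parte in enumerate(reversed(partes)):
--         valor_base = 0
--         for ch in parte:
--             if ch == '.':
--                 valor_base += 1
--             elif ch == '|':
--                 valor_base += 5
--             elif ch == '0':
--                 valor_base += 0
--         valor_total += valor_base * (20 ** i)
--     return valor_total
-- ===== SOURCE B (Python) =====
-- def convertir_numero(s):
--     # Horner: fold over the parts left-to-right, multiply-and-add instead of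
--     # reversed() + explicit powers of 20.
--     total = 0
--     for parte in s.split(','):
--         total = total * 20 + sum(1 if ch == '.' else 5 if ch == '|' else 0 for ch in parte)
--     return total
-- ===== Notes on version B (the rewrite author's own statement) =====
-- stated objective: simpler
-- what changed: Replaces the reversed-enumerate sum of digit values weighted by 20**i with a forward Horner fold (total = total*20 + digit), and the inner if/elif counting loop with a generator-sum of per-char values.
import Mathlib
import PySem

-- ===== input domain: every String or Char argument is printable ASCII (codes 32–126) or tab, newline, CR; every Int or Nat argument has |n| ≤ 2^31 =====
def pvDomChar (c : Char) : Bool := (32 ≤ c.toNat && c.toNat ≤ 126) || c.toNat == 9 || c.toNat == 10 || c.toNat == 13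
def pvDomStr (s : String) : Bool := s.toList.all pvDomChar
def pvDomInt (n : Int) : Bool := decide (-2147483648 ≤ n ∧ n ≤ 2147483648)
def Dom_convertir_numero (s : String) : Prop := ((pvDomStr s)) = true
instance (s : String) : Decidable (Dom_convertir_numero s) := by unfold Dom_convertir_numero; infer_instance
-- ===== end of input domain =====

-- B replaces A's reversed()+20**i weighted sum with a forward Horner fold; same value (objective: simpler).

-- ===== PORT A =====
-- s.split(',') with a nonempty separator is exactly Chars.splitOn on the code points
def convertir_numero (s : String) : Int :=
  let partes := PySem.Chars.splitOn s.toList [',']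
  (PySem.List.enumerate partes.reverse).foldl
    (fun valor_total p =>
      let valor_base : Int := p.2.foldl
        (fun vb ch =>
          if ch == '.' then vb + 1
          else if ch == '|' then vb + 5
          else if ch == '0' then vb + 0
          else vb) 0
      valor_total + valor_base * 20 ^ p.1.toNat) 0

-- ===== PORT B =====
def pvDigitVal (ch : Char) : Int :=
  if ch == '.' then 1 else if ch == '|' then 5 else 0

def convertir_numero_alt (s : String) : Int :=
  (PySem.Chars.splitOn s.toList [',']).foldl
    (fun total parte => total * 20 + (parte.map pvDigitVal).sum) 0

-- ===== PRECONDITION & SPEC =====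
def Spec_convertir_numero (s : String) (out : Int) : Prop := out = convertir_numero_alt s
instance (s : String) (out : Int) : Decidable (Spec_convertir_numero s out) := by unfold Spec_convertir_numero; infer_instance

-- ===== CLAIM (what is proved, stated in full; the proofs are below) =====
def Claim_equal_convertir_numero : Prop := ∀ (s : String), Dom_convertir_numero s → Spec_convertir_numero s (convertir_numero s)

-- ===== LEMMAS AND PROOFS =====

-- A's inner character loop computes the sum of per-char digit values.
theorem inner_eq (cs : List Char) (a : Int) :
    cs.foldl (fun vb ch =>
      if ch == '.' then vb + 1
      else if ch == '|' then vb + 5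
      else if ch == '0' then vb + 0
      else vb) a = a + (cs.map pvDigitVal).sum := by
  induction cs generalizing a with
  | nil => simp
  | cons c cs ih =>
    simp only [List.foldl_cons, List.map_cons, List.sum_cons, ih, pvDigitVal]
    split_ifs <;> ring

-- position-weighted value with powers starting at n
def pvU (L : List (List Char)) (n : Nat) : Int :=
  match L with
  | [] => 0
  | x :: xs => (x.map pvDigitVal).sum * 20 ^ n + pvU xs (n + 1)

-- Horner-style value
def pvV (L : List (List Char)) : Int :=
  match L with
  | [] => 0
  | x :: xs => (x.map pvDigitVal).sum * 20 ^ xs.length + pvV xs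

theorem pvU_append (A B : List (List Char)) (n : Nat) :
    pvU (A ++ B) n = pvU A n + pvU B (n + A.length) := by
  induction A generalizing n with
  | nil => simp [pvU]
  | cons x xs ih =>
    simp only [List.cons_append, pvU, ih, List.length_cons]
    have h : n + 1 + xs.length = n + (xs.length + 1) := by omega
    rw [h]; ring

theorem pvU_reverse (L : List (List Char)) (n : Nat) :
    pvU L.reverse n = pvV L * 20 ^ n := by
  induction L generalizing n with
  | nil => simp [pvU, pvV]
  | cons x xs ih =>
    simp [List.reverse_cons, pvU_append, pvU, pvV, ih]
    ring

theorem foldl_enumerate_eq_pvU (M : List (List Char)) (n : Nat) (a : Int) :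
    (PySem.List.enumerate M (n : Int)).foldl
      (fun valor_total p =>
        let valor_base : Int := p.2.foldl
          (fun vb ch =>
            if ch == '.' then vb + 1
            else if ch == '|' then vb + 5
            else if ch == '0' then vb + 0
            else vb) 0
        valor_total + valor_base * 20 ^ p.1.toNat) a = a + pvU M n := by
  induction M generalizing n a with
  | nil => simp [PySem.List.enumerate_nil, pvU]
  | cons x xs ih =>
    rw [PySem.List.enumerate_cons, List.foldl_cons]
    have hcast : (n : Int) + 1 = ((n + 1 : Nat) : Int) := by push_cast; ring
    rw [hcast, ih]
    simp only [inner_eq, Int.toNat_natCast, zero_add, pvU]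
    ring

theorem foldl_horner_eq_pvV (L : List (List Char)) (a : Int) :
    L.foldl (fun total parte => total * 20 + (parte.map pvDigitVal).sum) a
      = a * 20 ^ L.length + pvV L := by
  induction L generalizing a with
  | nil => simp [pvV]
  | cons x xs ih =>
    simp only [List.foldl_cons, ih, pvV, List.length_cons]
    ring

-- ===== VERDICT (by name: the statement is the Claim_ definition above) =====
theorem convertir_numero_spec : Claim_equal_convertir_numero := by
  intro s _
  unfold Spec_convertir_numero convertir_numero convertir_numero_alt
  have h := foldl_enumerate_eq_pvU (PySem.Chars.splitOn s.toList [',']).reverse 0 0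
  simp only [Nat.cast_zero] at h
  simp only [h, pvU_reverse, foldl_horner_eq_pvV]
  ring
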